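-- pv_equiv track=rewrite | github.com/mfellman/MiniCloud | services/dashboard/app/main.py | _scope_allowed
-- ===== SOURCE A (Python) =====
-- def _scope_allowed(granted: set[str], required: str) -> bool:
--     if "minicloud:*" in granted:
--         return True
--     if required in granted:
--         return True
--     parts = required.split(":")
--     for i in range(len(parts), 1, -1):
--         candidate = ":".join(parts[: i - 1]) + ":*"
--         if candidate in granted:
--             return True
--     return False
-- ===== SOURCE B (Python) =====
-- def _scope_allowed(granted: set[str], required: str) -> bool:
--     if "minicloud:*" in granted:
--         return True
--     if required in granted:
--         return True
--     for g in granted: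
--         if g.endswith(":*") and required.startswith(g[:-1]):
--             return True
--     return False
-- ===== Notes on version B (the rewrite author's own statement) =====
-- stated objective: alternative
-- what changed: Instead of synthesizing shrinking wildcard candidate keys from `required` (split on ':', join prefixes, append ':*') and looking each up in the granted set, B keeps the two guards and scans the granted set once, prefix-testing `required` against each entry that ends in ':*'.
import Mathlib
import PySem

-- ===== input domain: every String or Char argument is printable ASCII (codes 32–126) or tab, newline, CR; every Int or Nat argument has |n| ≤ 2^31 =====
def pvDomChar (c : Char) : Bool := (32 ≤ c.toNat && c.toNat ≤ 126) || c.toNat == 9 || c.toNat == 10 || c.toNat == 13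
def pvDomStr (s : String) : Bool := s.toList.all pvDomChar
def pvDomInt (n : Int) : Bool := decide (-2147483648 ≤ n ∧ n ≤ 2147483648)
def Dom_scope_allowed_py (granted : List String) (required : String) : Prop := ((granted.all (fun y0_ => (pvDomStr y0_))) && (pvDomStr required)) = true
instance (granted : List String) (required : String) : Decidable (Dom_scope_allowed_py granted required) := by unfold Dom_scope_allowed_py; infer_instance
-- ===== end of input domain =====

-- B replaces A's synthesis of shrinking wildcard candidate keys from `required` by a single
-- scan of the granted set prefix-testing each ':*' entry (alternative decomposition, same cost).


-- ===== PORT A =====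
-- required.split(":") is ported at the Chars level (separator is nonempty, so
-- PySem.Chars.splitOn is exact); ":".join(...) + ":*" is Chars.join plus list append.
def scope_allowed_py (granted : List String) (required : String) : Bool :=
  if granted.contains "minicloud:*" then true
  else if granted.contains required then true
  else
    let parts := PySem.Chars.splitOn required.toList [':']
    (PySem.List.pyRange (parts.length : Int) 1 (-1)).any fun i =>
      let candidate := String.ofList
        (PySem.Chars.join [':'] (PySem.List.slice parts none (some (i - 1))) ++ [':', '*'])
      granted.contains candidate

-- ===== PORT B =====
def scope_allowed_py_alt (granted : List String) (required : String) : Bool :=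
  if granted.contains "minicloud:*" then true
  else if granted.contains required then true
  else granted.any fun g =>
    PySem.Str.endswith g ":*" && PySem.Str.startswith required (PySem.Str.slice g none (some (-1)))

-- ===== PRECONDITION & SPEC =====
def Spec_scope_allowed_py (granted : List String) (required : String) (out : Bool) : Prop := out = scope_allowed_py_alt granted required
instance (granted : List String) (required : String) (out : Bool) : Decidable (Spec_scope_allowed_py granted required out) := by unfold Spec_scope_allowed_py; infer_instance

-- ===== CLAIM (what is proved, stated in full; the proofs are below) =====
def Claim_equal_scope_allowed_py : Prop := ∀ (granted : List String) (required : String), Dom_scope_allowed_py granted required → Spec_scope_allowed_py granted required (scope_allowed_py granted required)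

-- ===== LEMMAS AND PROOFS =====

theorem splitOn_go_eq (c : Char) (fuel : Nat) (l cur : List Char) (acc : List (List Char))
    (h : l.length ≤ fuel) :
    PySem.Chars.splitOn.go [c] fuel l cur acc
      = acc.reverse ++ (l.splitOn c).modifyHead (cur.reverse ++ ·) := by
  induction fuel generalizing l cur acc with
  | zero =>
    have : l = [] := by cases l <;> simp_all
    subst this
    simp [PySem.Chars.splitOn.go, List.splitOn]
  | succ fuel ih =>
    cases l with
    | nil => simp [PySem.Chars.splitOn.go, List.splitOn]
    | cons x rest =>
      rw [PySem.Chars.splitOn.go]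
      obtain ⟨h0, t0, e0⟩ := List.exists_cons_of_ne_nil (List.splitOnP_ne_nil (· == c) rest)
      by_cases hx : x = c
      · subst hx
        simp only [List.isPrefixOf, Bool.and_true, beq_self_eq_true, if_pos, List.length_cons] at *
        have hd : List.drop (([] : List Char).length + 1) (x :: rest) = rest := by simp
        rw [hd, ih rest [] (cur.reverse :: acc) (by omega)]
        simp [List.splitOn, e0]
      · have : [c].isPrefixOf (x :: rest) = false := by
          simp [List.isPrefixOf]
          exact fun hh => absurd hh.symm hx
        rw [this]
        simp only [if_neg Bool.false_ne_true]
        rw [ih rest (x :: cur) acc (by simp at h; omega)]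
        simp [List.splitOn, e0, List.splitOnP_cons, hx]

theorem pysplitOn_eq (s : List Char) (c : Char) :
    PySem.Chars.splitOn s [c] = s.splitOn c := by
  rw [PySem.Chars.splitOn, splitOn_go_eq c (s.length + 1) s [] [] (by omega)]
  obtain ⟨h0, t0, e0⟩ := List.exists_cons_of_ne_nil (List.splitOnP_ne_nil (· == c) s)
  simp [List.splitOn, e0]

theorem join_append_char (c : Char) (ps qs : List (List Char)) (hp : ps ≠ []) (hq : qs ≠ []) :
    PySem.Chars.join [c] (ps ++ qs) = PySem.Chars.join [c] ps ++ c :: PySem.Chars.join [c] qs := by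
  induction ps with
  | nil => exact absurd rfl hp
  | cons p ps ih =>
    cases ps with
    | nil =>
      obtain ⟨q, qs', rfl⟩ := List.exists_cons_of_ne_nil hq
      simp [PySem.Chars.join_cons_cons, PySem.Chars.join_singleton]
    | cons p2 rest =>
      have h2 : (p2 :: rest) ++ qs ≠ [] := by simp
      have e : p2 :: (rest ++ qs) = (p2 :: rest) ++ qs := by simp
      rw [List.cons_append, List.cons_append, PySem.Chars.join_cons_cons, e, ih (by simp)]
      rw [PySem.Chars.join_cons_cons]
      simp

theorem prefix_colon_iff (cs w : List Char) :
    (w ++ [':']) <+: cs ↔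
      ∃ k : Nat, 1 ≤ k ∧ k < (cs.splitOn ':').length ∧
        w = PySem.Chars.join [':'] ((cs.splitOn ':').take k) := by
  constructor
  · rintro ⟨t, ht⟩
    have hcs : cs = w ++ ':' :: t := by rw [← ht]; simp
    have hsplit : cs.splitOn ':' = w.splitOn ':' ++ t.splitOn ':' := by
      rw [hcs]
      simp only [List.splitOn]
      exact List.splitOnP_append_cons (· == ':') w t ':' (by simp)
    refine ⟨(w.splitOn ':').length, ?_, ?_, ?_⟩
    · have := List.splitOnP_ne_nil (· == ':') w
      simp only [List.splitOn]
      cases h : List.splitOnP (· == ':') w with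
      | nil => exact absurd h this
      | cons a b => simp
    · rw [hsplit]
      have := List.splitOnP_ne_nil (· == ':') t
      simp only [List.splitOn, List.length_append]
      cases h : List.splitOnP (· == ':') t with
      | nil => exact absurd h this
      | cons a b =>
        simp only [List.length_cons]
        omega
    · rw [hsplit, List.take_left, PySem.Chars.join.eq_1, List.intercalate_splitOn]
  · rintro ⟨k, hk1, hk2, rfl⟩
    have hjoin : cs = PySem.Chars.join [':'] (cs.splitOn ':') := by
      rw [PySem.Chars.join.eq_1, List.intercalate_splitOn]
    have htd : cs.splitOn ':' = (cs.splitOn ':').take k ++ (cs.splitOn ':').drop k := by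
      simp
    have h1 : (cs.splitOn ':').take k ≠ [] := by
      have : ((cs.splitOn ':').take k).length = min k (cs.splitOn ':').length := by simp
      intro hemp; rw [hemp] at this; simp at this; omega
    have h2 : (cs.splitOn ':').drop k ≠ [] := by
      have : ((cs.splitOn ':').drop k).length = (cs.splitOn ':').length - k := by simp
      intro hemp; rw [hemp] at this; simp at this; omega
    refine ⟨PySem.Chars.join [':'] ((cs.splitOn ':').drop k), ?_⟩
    conv_rhs => rw [hjoin, htd]
    rw [join_append_char ':' _ _ h1 h2]
    simp

theorem mem_pyRange_down (N : Nat) (i : Int) :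
    i ∈ PySem.List.pyRange (N : Int) 1 (-1) ↔ 2 ≤ i ∧ i ≤ (N : Int) := by
  unfold PySem.List.pyRange
  norm_num
  by_cases h : 1 < N
  · rw [if_pos h]
    constructor
    · rintro ⟨k, hk, rfl⟩
      omega
    · rintro ⟨h2, hN⟩
      exact ⟨(N - i).toNat, by omega, by omega⟩
  · rw [if_neg h]
    simp only [Nat.not_lt] at *
    constructor
    · rintro ⟨k, hk, rfl⟩; omega
    · rintro ⟨h2, hN⟩; omega


theorem ports_agree (granted : List String) (required : String) :
    scope_allowed_py granted required = scope_allowed_py_alt granted required := by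
  unfold scope_allowed_py scope_allowed_py_alt
  split_ifs with h1 h2
  · rfl
  · rfl
  rw [pysplitOn_eq]
  rw [Bool.eq_iff_iff, List.any_eq_true, List.any_eq_true]
  constructor
  · rintro ⟨i, hi, hc⟩
    rw [mem_pyRange_down] at hi
    obtain ⟨hi2, hiN⟩ := hi
    simp only at hc
    rw [show PySem.List.slice (required.toList.splitOn ':') none (some (i - 1))
        = (required.toList.splitOn ':').take (i - 1).toNat from
      PySem.List.slice_to _ (by omega)] at hc
    obtain ⟨k, hk⟩ : ∃ k : Nat, (i - 1).toNat = k := ⟨_, rfl⟩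
    rw [hk] at hc
    have hk1 : 1 ≤ k := by omega
    have hk2 : k < (required.toList.splitOn ':').length := by omega
    refine ⟨String.ofList (PySem.Chars.join [':'] (List.take k (List.splitOn ':' required.toList)) ++ [':', '*']), List.contains_iff_mem.mp hc, ?_⟩
    rw [Bool.and_eq_true, PySem.Str.endswith_eq, PySem.Str.startswith_eq,
      PySem.Chars.endswith_iff, PySem.Chars.startswith_iff]
    constructor
    · simp
    · rw [PySem.Str.slice_to_neg_one, String.toList_ofList]
      have hdl : (PySem.Chars.join [':'] ((required.toList.splitOn ':').take k) ++ [':', '*']).dropLast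
          = PySem.Chars.join [':'] ((required.toList.splitOn ':').take k) ++ [':'] := by
        have : PySem.Chars.join [':'] ((required.toList.splitOn ':').take k) ++ [':', '*']
            = (PySem.Chars.join [':'] ((required.toList.splitOn ':').take k) ++ [':']) ++ ['*'] := by simp
        rw [this, List.dropLast_concat]
      rw [hdl]
      exact (prefix_colon_iff required.toList (PySem.Chars.join [':'] (List.take k (List.splitOn ':' required.toList)))).mpr ⟨k, hk1, hk2, rfl⟩
  · rintro ⟨g, hg, hgp⟩
    rw [Bool.and_eq_true, PySem.Str.endswith_eq, PySem.Str.startswith_eq,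
      PySem.Chars.endswith_iff, PySem.Chars.startswith_iff,
      PySem.Str.slice_to_neg_one] at hgp
    obtain ⟨⟨u, hu⟩, hpre⟩ := hgp
    have hstar : ":*".toList = [':', '*'] := rfl
    rw [hstar] at hu
    have hdl : g.toList.dropLast = u ++ [':'] := by
      rw [← hu]
      have : u ++ [':', '*'] = (u ++ [':']) ++ ['*'] := by simp
      rw [this, List.dropLast_concat]
    rw [hdl] at hpre
    obtain ⟨k, hk1, hk2, hw⟩ := (prefix_colon_iff required.toList u).mp hpre
    refine ⟨(k : Int) + 1, ?_, ?_⟩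
    · rw [mem_pyRange_down]
      omega
    · simp only
      rw [show PySem.List.slice (required.toList.splitOn ':') none (some ((k : Int) + 1 - 1))
          = (required.toList.splitOn ':').take ((k : Int) + 1 - 1).toNat from
        PySem.List.slice_to _ (by omega)]
      have hkk : ((k : Int) + 1 - 1).toNat = k := by omega
      rw [hkk, List.contains_iff_mem, ← hw, hu, String.ofList_toList]
      exact hg

-- ===== VERDICT (by name: the statement is the Claim_ definition above) =====
theorem scope_allowed_py_spec : Claim_equal_scope_allowed_py := by
  intro granted required _
  unfold Spec_scope_allowed_py
  exact ports_agree granted required
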